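-- pv_equiv track=rewrite | github.com/cocounni/Algorithm | 프로그래머스/2/152996. 시소 짝꿍/시소 짝꿍.py | solution
-- ===== SOURCE A (Python) =====
-- from collections import Counter
--
-- def solution(weights):
--     weight_count = Counter(weights)
--     answer = 0
--
--     ratios = [(1, 1), (2, 3), (3, 4), (1, 2)]
--
--     for w in weight_count:
--         if weight_count[w] > 1:
--             answer += weight_count[w] * (weight_count[w] - 1) // 2
--
--     weights = sorted(weight_count.keys())
--
--     for i in range(len(weights)):
--         for j in range(i + 1, len(weights)):
--             w1, w2 = weights[i], weights[j]
--             for r1, r2 in ratios[1:]: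
--                 if w1 * r2 == w2 * r1:
--                     answer += weight_count[w1] * weight_count[w2]
--
--     return answer
-- ===== SOURCE B (Python) =====
-- from collections import Counter
--
-- def solution(weights):
--     cnt = Counter(weights)
--     answer = 0
--     for w, c in cnt.items():
--         # pairs of equal weights
--         answer += c * (c - 1) // 2
--         # for each fixed ratio, look up the unique heavier partner directly
--         for r1, r2 in ((2, 3), (3, 4), (1, 2)):
--             num = w * r2
--             if num % r1 == 0:
--                 v = num // r1
--                 if v > w:
--                     answer += c * cnt.get(v, 0)
--     return answer
-- ===== Notes on version B (the rewrite author's own statement) =====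
-- stated objective: faster
-- what changed: Replaces the O(k^2) double loop over all sorted distinct-weight pairs by a single pass over the Counter that looks up each weight's three fixed-ratio partners (w*3/2, w*4/3, w*2) directly in the dict.
import Mathlib
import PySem

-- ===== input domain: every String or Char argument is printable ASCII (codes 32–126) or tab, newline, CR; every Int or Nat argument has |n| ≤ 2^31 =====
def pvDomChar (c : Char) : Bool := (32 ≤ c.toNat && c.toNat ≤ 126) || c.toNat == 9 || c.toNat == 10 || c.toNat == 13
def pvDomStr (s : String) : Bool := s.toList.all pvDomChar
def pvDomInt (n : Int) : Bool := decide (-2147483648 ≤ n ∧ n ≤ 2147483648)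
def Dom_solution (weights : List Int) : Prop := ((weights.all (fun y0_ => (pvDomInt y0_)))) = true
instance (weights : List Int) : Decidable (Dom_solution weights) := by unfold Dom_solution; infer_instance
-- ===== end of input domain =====

-- B replaces A's quadratic double loop over sorted distinct weights by one pass over the
-- Counter that looks up each weight's three fixed-ratio partners directly (objective: faster).

-- ===== PORT A =====
def ratios_A : List (Int × Int) := [(1, 1), (2, 3), (3, 4), (1, 2)]

def solution (weights : List Int) : Int :=
  let wc := PySem.Dict.counter weights            -- weight_count = Counter(weights)
  let answer : Int := 0
  -- for w in weight_count: …  (weight_count[w] reads a present key, so getD _ 0 is exact)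
  let answer := wc.keys.foldl (fun acc w =>
    if wc.getD w 0 > 1 then
      acc + PySem.Int.floordiv (wc.getD w 0 * (wc.getD w 0 - 1)) 2
    else acc) answer
  let ws := PySem.List.sorted wc.keys (fun x => x) false   -- weights = sorted(weight_count.keys())
  let answer := (PySem.List.pyRange 0 (ws.length : Int) 1).foldl (fun acc i =>
    (PySem.List.pyRange (i + 1) (ws.length : Int) 1).foldl (fun acc2 j =>
      let w1 := PySem.List.pyGetD ws i 0
      let w2 := PySem.List.pyGetD ws j 0
      (PySem.List.slice ratios_A (some 1) none).foldl (fun acc3 r =>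
        if w1 * r.2 = w2 * r.1 then acc3 + wc.getD w1 0 * wc.getD w2 0 else acc3) acc2) acc) answer
  answer

-- ===== PORT B =====
def ratios_B : List (Int × Int) := [(2, 3), (3, 4), (1, 2)]

def solution_alt (weights : List Int) : Int :=
  let cnt := PySem.Dict.counter weights
  cnt.items.foldl (fun answer p =>
    let answer := answer + PySem.Int.floordiv (p.2 * (p.2 - 1)) 2
    ratios_B.foldl (fun a r =>
      let num := p.1 * r.2
      if PySem.Int.mod num r.1 = 0 then
        let v := PySem.Int.floordiv num r.1
        if v > p.1 then a + p.2 * cnt.getD v 0 else a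
      else a) answer) 0

-- ===== PRECONDITION & SPEC =====
def Spec_solution (weights : List Int) (out : Int) : Prop := out = solution_alt weights
instance (weights : List Int) (out : Int) : Decidable (Spec_solution weights out) := by unfold Spec_solution; infer_instance

-- ===== CLAIM (what is proved, stated in full; the proofs are below) =====
def Claim_equal_solution : Prop := ∀ (weights : List Int), Dom_solution weights → Spec_solution weights (solution weights)

-- ===== LEMMAS AND PROOFS =====

-- count of b in weights, as an Int
def cntI (weights : List Int) (b : Int) : Int := (List.count b weights : Int)

-- the same-weight term of each program
def eA (weights : List Int) (w : Int) : Int :=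
  if cntI weights w > 1 then PySem.Int.floordiv (cntI weights w * (cntI weights w - 1)) 2 else 0

def eB (weights : List Int) (w : Int) : Int :=
  PySem.Int.floordiv (cntI weights w * (cntI weights w - 1)) 2

-- A's contribution of one pair (a, b) of distinct weights
def pairP (weights : List Int) (a b : Int) : Int :=
  (ratios_B.map (fun r => if a * r.2 = b * r.1 then cntI weights a * cntI weights b else 0)).sum

-- B's cross contribution of one distinct weight a
def qTerm (weights : List Int) (a : Int) : Int :=
  (ratios_B.map (fun r =>
    if PySem.Int.mod (a * r.2) r.1 = 0 ∧ a < PySem.Int.floordiv (a * r.2) r.1 then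
      cntI weights a * cntI weights (PySem.Int.floordiv (a * r.2) r.1)
    else 0)).sum

-- A's double loop as a structural recursion: head against tail, then the tail's pairs
def crossA (weights : List Int) : List Int → Int
  | [] => 0
  | a :: t => (t.map (pairP weights a)).sum + crossA weights t

theorem slice_ratios : PySem.List.slice ratios_A (some 1) none = ratios_B := by decide

-- A's literal ratio scan, as init + pairP
theorem ratioFoldA (weights : List Int) (w1 w2 acc : Int) :
    ratios_B.foldl (fun acc3 r =>
      if w1 * r.2 = w2 * r.1 then
        acc3 + ((List.count w1 weights : Int)) * ((List.count w2 weights : Int))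
      else acc3) acc
    = acc + pairP weights w1 w2 := by
  simp only [ratios_B, pairP, cntI, List.foldl_cons, List.foldl_nil, List.map_cons, List.map_nil,
    List.sum_cons, List.sum_nil]
  split_ifs <;> ring

-- B's literal ratio scan, as init + qTerm
set_option maxHeartbeats 1000000 in
theorem ratioFoldB (weights : List Int) (k acc : Int) :
    ratios_B.foldl (fun a r =>
      if PySem.Int.mod (k * r.2) r.1 = 0 then
        (if PySem.Int.floordiv (k * r.2) r.1 > k then
          a + ((List.count k weights : Int)) * ((List.count (PySem.Int.floordiv (k * r.2) r.1) weights : Int))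
        else a)
      else a) acc
    = acc + qTerm weights k := by
  simp only [ratios_B, qTerm, cntI, List.foldl_cons, List.foldl_nil, List.map_cons, List.map_nil,
    List.sum_cons, List.sum_nil, gt_iff_lt]
  split_ifs <;> first | tauto | ring

-- Σ_{b ∈ t} (if b = v then c b else 0) collapses on a Nodup list
theorem sum_ite_mem (t : List Int) (v : Int) (c : Int → Int) (hnd : t.Nodup) :
    (t.map (fun b => if b = v then c b else 0)).sum = if v ∈ t then c v else 0 := by
  induction t with
  | nil => simp
  | cons x t ih =>
    rcases List.nodup_cons.mp hnd with ⟨hx, hnd'⟩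
    simp only [List.map_cons, List.sum_cons, ih hnd', List.mem_cons]
    by_cases hxv : x = v
    · subst hxv; simp [hx]
    · have hvx : ¬ v = x := fun h => hxv h.symm
      by_cases hv : v ∈ t <;> simp [hv, hxv, hvx]

-- per-ratio collapse of the inner scan to B's single lookup
theorem perRatio (weights : List Int) (a : Int) (t : List Int) (r1 r2 : Int)
    (hr : 0 < r1) (hnd : t.Nodup)
    (ht : ∀ b, b ∈ t ↔ (b ∈ weights ∧ a < b)) :
    (t.map (fun b => if a * r2 = b * r1 then cntI weights a * cntI weights b else 0)).sum =
      (if PySem.Int.mod (a * r2) r1 = 0 ∧ a < PySem.Int.floordiv (a * r2) r1 then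
        cntI weights a * cntI weights (PySem.Int.floordiv (a * r2) r1) else 0) := by
  set v := PySem.Int.floordiv (a * r2) r1 with hv
  by_cases hd : r1 ∣ a * r2
  · have hm0 : PySem.Int.mod (a * r2) r1 = 0 := (PySem.Int.mod_eq_zero_iff_dvd _ _).mpr hd
    have hfm := PySem.Int.floordiv_mul_add_mod (a * r2) r1
    rw [hm0] at hfm
    have hav : a * r2 = v * r1 := by rw [hv]; linarith
    have hiff : ∀ b : Int, (a * r2 = b * r1) ↔ b = v := by
      intro b
      constructor
      · intro h
        have hb : b * r1 = v * r1 := by linarith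
        exact mul_right_cancel₀ (by omega : r1 ≠ 0) hb
      · intro h; rw [h, ← hav]
    have hmap : (t.map (fun b => if a * r2 = b * r1 then cntI weights a * cntI weights b else 0))
         = (t.map (fun b => if b = v then cntI weights a * cntI weights b else 0)) := by
      apply List.map_congr_left; intro b _; simp only [hiff b]
    rw [hmap, sum_ite_mem t v _ hnd]
    by_cases hlt : a < v
    · by_cases hvt : v ∈ t
      · simp [hvt, hm0, hlt]
      · have hz : cntI weights v = 0 := by
          have hnw : v ∉ weights := fun hw => hvt ((ht v).mpr ⟨hw, hlt⟩)
          simp [cntI, List.count_eq_zero.mpr hnw]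
        simp [hvt, hm0, hlt, hz]
    · have hvt : v ∉ t := fun hmem => hlt ((ht v).mp hmem).2
      simp [hvt, hm0, hlt]
  · have hm0 : ¬ PySem.Int.mod (a * r2) r1 = 0 := fun h => hd ((PySem.Int.mod_eq_zero_iff_dvd _ _).mp h)
    have hmap : (t.map (fun b => if a * r2 = b * r1 then cntI weights a * cntI weights b else 0))
         = t.map (fun _ => (0 : Int)) := by
      apply List.map_congr_left; intro b _
      have hne : ¬ (a * r2 = b * r1) := fun h => hd ⟨b, by rw [h, mul_comm]⟩
      simp [hne]
    simp [hmap, hm0]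

-- head step: A's scan of everything above a equals B's three lookups at a
theorem perHead (weights : List Int) (a : Int) (t : List Int) (hnd : t.Nodup)
    (ht : ∀ b, b ∈ t ↔ (b ∈ weights ∧ a < b)) :
    (t.map (pairP weights a)).sum = qTerm weights a := by
  have hB : pairP weights a = fun b =>
      (if a * 3 = b * 2 then cntI weights a * cntI weights b else 0)
      + ((if a * 4 = b * 3 then cntI weights a * cntI weights b else 0)
      + (if a * 2 = b * 1 then cntI weights a * cntI weights b else 0)) := by
    funext b
    simp [pairP, ratios_B]
  simp only [qTerm, ratios_B, List.map_cons, List.map_nil, List.sum_cons, List.sum_nil,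
    add_zero, hB]
  rw [PySem.List.sum_map_add_int t
    (fun b => if a * 3 = b * 2 then cntI weights a * cntI weights b else 0)
    (fun b => (if a * 4 = b * 3 then cntI weights a * cntI weights b else 0)
      + (if a * 2 = b * 1 then cntI weights a * cntI weights b else 0))]
  rw [PySem.List.sum_map_add_int t
    (fun b => if a * 4 = b * 3 then cntI weights a * cntI weights b else 0)
    (fun b => if a * 2 = b * 1 then cntI weights a * cntI weights b else 0)]
  rw [perRatio weights a t 2 3 (by norm_num) hnd ht,
      perRatio weights a t 3 4 (by norm_num) hnd ht,
      perRatio weights a t 1 2 (by norm_num) hnd ht]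

-- the two cross sums agree on a strictly increasing, upward-closed list of weights
theorem crossEq (weights : List Int) (s : List Int)
    (hp : s.Pairwise (· < ·))
    (hc : ∀ a ∈ s, ∀ b, b ∈ weights → a < b → b ∈ s)
    (hm : ∀ b ∈ s, b ∈ weights) :
    crossA weights s = (s.map (qTerm weights)).sum := by
  induction s with
  | nil => simp [crossA]
  | cons a t ih =>
    rcases List.pairwise_cons.mp hp with ⟨hat, hpt⟩
    have hnd : t.Nodup := hpt.imp (fun h => ne_of_lt h)
    have ht : ∀ b, b ∈ t ↔ (b ∈ weights ∧ a < b) := by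
      intro b
      constructor
      · intro hb
        exact ⟨hm b (List.mem_cons_of_mem _ hb), hat b hb⟩
      · rintro ⟨hw, hab⟩
        rcases List.mem_cons.mp (hc a List.mem_cons_self b hw hab) with h | h
        · omega
        · exact h
    have hc' : ∀ a' ∈ t, ∀ b, b ∈ weights → a' < b → b ∈ t := by
      intro a' ha' b hw hab
      exact (ht b).mpr ⟨hw, lt_trans (hat a' ha') hab⟩
    have hm' : ∀ b ∈ t, b ∈ weights := fun b hb => hm b (List.mem_cons_of_mem _ hb)
    simp only [crossA, List.map_cons, List.sum_cons, perHead weights a t hnd ht, ih hpt hc' hm']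

theorem pyRange_shift (a b : Int) :
    PySem.List.pyRange (a + 1) (b + 1) 1 = (PySem.List.pyRange a b 1).map (· + 1) := by
  rw [PySem.List.pyRange_one, PySem.List.pyRange_one, List.map_map]
  have h : b + 1 - (a + 1) = b - a := by ring
  rw [h]
  apply List.map_congr_left
  intro k _
  simp only [Function.comp_apply]
  ring

theorem pyGetD_cons (x : Int) (t : List Int) (i : Int) (hi : 0 ≤ i) (d : Int) :
    PySem.List.pyGetD (x :: t) (i + 1) d = PySem.List.pyGetD t i d := by
  obtain ⟨k, rfl⟩ := Int.eq_ofNat_of_zero_le hi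
  rw [show ((k : Int) + 1) = ((k + 1 : Nat) : Int) by push_cast; ring]
  rw [PySem.List.pyGetD_natCast, PySem.List.pyGetD_natCast]
  rfl

-- A's index double loop, summed, is crossA
theorem tri (weights : List Int) (s : List Int) :
    ((PySem.List.pyRange 0 (s.length : Int) 1).map (fun i =>
      ((PySem.List.pyRange (i + 1) (s.length : Int) 1).map (fun j =>
        pairP weights (PySem.List.pyGetD s i 0) (PySem.List.pyGetD s j 0))).sum)).sum
    = crossA weights s := by
  induction s with
  | nil => simp [PySem.List.pyRange_one_eq_nil, crossA]
  | cons a t ih =>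
    have hn : ((a :: t).length : Int) = (t.length : Int) + 1 := by simp
    rw [hn]
    have h0 : (0 : Int) < (t.length : Int) + 1 := by positivity
    rw [PySem.List.pyRange_one_cons h0, List.map_cons, List.sum_cons]
    have hhead :
        ((PySem.List.pyRange (0 + 1) ((t.length : Int) + 1) 1).map (fun j =>
          pairP weights (PySem.List.pyGetD (a :: t) 0 0) (PySem.List.pyGetD (a :: t) j 0))).sum
        = (t.map (pairP weights a)).sum := by
      rw [pyRange_shift 0 (t.length : Int), List.map_map]
      have hg : PySem.List.pyGetD (a :: t) 0 0 = a := by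
        rw [PySem.List.pyGetD_ofNat']; rfl
      rw [hg]
      have hmc : ((PySem.List.pyRange 0 (t.length : Int) 1).map
            ((fun j => pairP weights a (PySem.List.pyGetD (a :: t) j 0)) ∘ (· + 1)))
          = ((PySem.List.pyRange 0 (t.length : Int) 1).map
            (fun j => pairP weights a (PySem.List.pyGetD t j 0))) := by
        apply List.map_congr_left
        intro j hj
        have hj0 : 0 ≤ j := (PySem.List.mem_pyRange_one.mp hj).1
        simp only [Function.comp_apply, pyGetD_cons a t j hj0]
      rw [hmc]
      rw [show (fun j => pairP weights a (PySem.List.pyGetD t j 0))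
            = (pairP weights a) ∘ (fun j => PySem.List.pyGetD t j 0) from rfl]
      rw [← List.map_map, PySem.List.map_pyGetD_pyRange_zero']
    rw [hhead]
    have htail :
        ((PySem.List.pyRange (0 + 1) ((t.length : Int) + 1) 1).map (fun i =>
          ((PySem.List.pyRange (i + 1) ((t.length : Int) + 1) 1).map (fun j =>
            pairP weights (PySem.List.pyGetD (a :: t) i 0) (PySem.List.pyGetD (a :: t) j 0))).sum)).sum
        = ((PySem.List.pyRange 0 (t.length : Int) 1).map (fun i =>
          ((PySem.List.pyRange (i + 1) (t.length : Int) 1).map (fun j =>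
            pairP weights (PySem.List.pyGetD t i 0) (PySem.List.pyGetD t j 0))).sum)).sum := by
      rw [pyRange_shift 0 (t.length : Int), List.map_map]
      congr 1
      apply List.map_congr_left
      intro i hi
      have hi0 : 0 ≤ i := (PySem.List.mem_pyRange_one.mp hi).1
      simp only [Function.comp_apply]
      rw [show i + 1 + 1 = (i + 1) + 1 from rfl, pyRange_shift (i + 1) (t.length : Int),
        List.map_map, pyGetD_cons a t i hi0]
      congr 1
      apply List.map_congr_left
      intro j hj
      have hj0 : 0 ≤ j := le_trans (by omega) (PySem.List.mem_pyRange_one.mp hj).1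
      simp only [Function.comp_apply, pyGetD_cons a t j hj0]
    rw [htail, ih]
    simp [crossA]

-- A's whole inner double loop over any list s, with any starting accumulator
theorem outerA (weights : List Int) (s : List Int) (init : Int) :
    (PySem.List.pyRange 0 (s.length : Int) 1).foldl (fun acc i =>
      (PySem.List.pyRange (i + 1) (s.length : Int) 1).foldl (fun acc2 j =>
        ratios_B.foldl (fun acc3 r =>
          if PySem.List.pyGetD s i 0 * r.2 = PySem.List.pyGetD s j 0 * r.1 then
            acc3 + ((List.count (PySem.List.pyGetD s i 0) weights : Int))
              * ((List.count (PySem.List.pyGetD s j 0) weights : Int))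
          else acc3) acc2) acc) init
    = init + crossA weights s := by
  have hinner : ∀ (i acc : Int),
      (PySem.List.pyRange (i + 1) (s.length : Int) 1).foldl (fun acc2 j =>
        ratios_B.foldl (fun acc3 r =>
          if PySem.List.pyGetD s i 0 * r.2 = PySem.List.pyGetD s j 0 * r.1 then
            acc3 + ((List.count (PySem.List.pyGetD s i 0) weights : Int))
              * ((List.count (PySem.List.pyGetD s j 0) weights : Int))
          else acc3) acc2) acc
      = acc + ((PySem.List.pyRange (i + 1) (s.length : Int) 1).map (fun j =>
          pairP weights (PySem.List.pyGetD s i 0) (PySem.List.pyGetD s j 0))).sum := by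
    intro i acc
    rw [PySem.List.foldl_congr_mem (PySem.List.pyRange (i + 1) (s.length : Int) 1) _
      (fun acc2 j => acc2 + pairP weights (PySem.List.pyGetD s i 0) (PySem.List.pyGetD s j 0)) acc
      (fun acc2 j _ => ratioFoldA weights (PySem.List.pyGetD s i 0) (PySem.List.pyGetD s j 0) acc2)]
    rw [PySem.List.foldl_add]
  rw [PySem.List.foldl_congr_mem (PySem.List.pyRange 0 (s.length : Int) 1) _
    (fun acc i => acc + ((PySem.List.pyRange (i + 1) (s.length : Int) 1).map (fun j =>
      pairP weights (PySem.List.pyGetD s i 0) (PySem.List.pyGetD s j 0))).sum) init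
    (fun acc i _ => hinner i acc)]
  rw [PySem.List.foldl_add, tri]

-- closed form of port A
theorem A_eq (weights : List Int) :
    solution weights =
      ((PySem.Set.ofList weights).map (eA weights)).sum
      + crossA weights (PySem.List.sorted (PySem.Set.ofList weights) (fun x => x) false) := by
  unfold solution
  simp only [PySem.Dict.keys_counter, PySem.Dict.getD_counter, slice_ratios]
  rw [PySem.List.foldl_congr_mem (PySem.Set.ofList weights) _
    (fun acc w => acc + eA weights w) 0
    (by
      intro acc w _
      simp only [eA, cntI]
      split_ifs <;> ring)]
  rw [PySem.List.foldl_add, outerA]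
  ring

-- closed form of port B
theorem B_eq (weights : List Int) :
    solution_alt weights =
      ((PySem.Set.ofList weights).map (fun k => eB weights k + qTerm weights k)).sum := by
  unfold solution_alt
  simp only [PySem.Dict.items_counter, PySem.Dict.getD_counter, List.foldl_map]
  rw [PySem.List.foldl_congr_mem (PySem.Set.ofList weights) _
    (fun ans k => ans + (eB weights k + qTerm weights k)) 0
    (by
      intro ans k _
      simp only []
      rw [ratioFoldB weights k]
      simp only [eB, cntI]
      ring)]
  rw [PySem.List.foldl_add]
  ring

-- ===== VERDICT (by name: the statement is the Claim_ definition above) =====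
theorem solution_spec : Claim_equal_solution := by
  intro weights _
  unfold Spec_solution
  rw [A_eq, B_eq, PySem.List.sum_map_add_int]
  have hmemS : ∀ b : Int,
      b ∈ PySem.List.sorted (PySem.Set.ofList weights) (fun x => x) false ↔ b ∈ weights := by
    intro b
    rw [PySem.List.mem_sorted, PySem.Set.mem_ofList]
  rw [crossEq weights _ (PySem.List.sorted_ofList_pairwise_lt weights)
    (fun a _ b hw hab => (hmemS b).mpr hw) (fun b hb => (hmemS b).mp hb)]
  have hperm : ((PySem.List.sorted (PySem.Set.ofList weights) (fun x => x) false).map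
      (qTerm weights)).sum = ((PySem.Set.ofList weights).map (qTerm weights)).sum :=
    ((PySem.List.sorted_perm (PySem.Set.ofList weights) (fun x => x) false).map
      (qTerm weights)).sum_eq
  rw [hperm]
  have hee : (PySem.Set.ofList weights).map (eA weights)
      = (PySem.Set.ofList weights).map (eB weights) := by
    apply List.map_congr_left
    intro k hk
    have hkw : k ∈ weights := (PySem.Set.mem_ofList weights k).mp hk
    have hc1 : 0 < List.count k weights := List.count_pos_iff.mpr hkw
    simp only [eA, eB, cntI]
    by_cases h : ((List.count k weights : Int) > 1)
    · simp [h]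
    · have h1 : (List.count k weights : Int) = 1 := by omega
      rw [h1]
      decide
  rw [hee]
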